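-- pv_equiv track=rewrite | github.com/mforman/advent-of-code | 2016/07/advent.py | supports_ssl
-- ===== SOURCE A (Python) =====
-- def is_aba(item):
--     if len(item) != 3:
--         return False
--     if item[0] != item[2]:
--         return False
--     if item[0] == item[1]:
--         return False
--     return True
--
-- def flip_aba(item):
--     return ''.join([item[1], item[0], item[1]])
--
-- def supports_ssl(item):
--     in_hypernet = False
--     aba = []
--     bab = []
--
--     for i in range(0, len(item) - 2):
--         candidate = item[i:i+3]
--         if candidate[0] == '[':
--             in_hypernet = True
--             continue
--         if candidate[0] == ']':
--             in_hypernet = False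
--             continue
--         if any(c in candidate for c in ('[', ']')):
--             continue
--
--         if not is_aba(candidate):
--             continue
--
--         if in_hypernet:
--             bab.append(candidate)
--         else:
--             aba.append(candidate)
--
--     if aba.count == 0 or bab.count == 0:
--         return False
--
--     for x in aba:
--         if flip_aba(x) in bab:
--             return True
--
--     return False
-- ===== SOURCE B (Python) =====
-- def supports_ssl(item):
--     # Label table + exhaustive search over index pairs: no ABA collections at all.
--     n = len(item)
--     labels = []
--     h = False
--     for c in item:
--         labels.append(h)
--         if c == '[':
--             h = True
--         elif c == ']':
--             h = False
--
--     def ok(i):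
--         a, b, c = item[i], item[i + 1], item[i + 2]
--         return (a not in '[]' and b not in '[]' and c not in '[]'
--                 and a == c and a != b)
--
--     for i in range(n - 2):
--         if ok(i) and not labels[i]:
--             for j in range(n - 2):
--                 if (ok(j) and labels[j]
--                         and item[j] == item[i + 1] and item[j + 1] == item[i]):
--                     return True
--     return False
-- ===== Notes on version B (the rewrite author's own statement) =====
-- stated objective: alternative
-- what changed: A runs a single-pass state machine that accumulates aba and bab window strings into lists and then scans the bab list for each flipped aba; B builds no collections at all: it precomputes a per-position hypernet label table in one pass and then decides the answer by an exhaustive early-returning search over pairs of window indices (i, j), checking in place that i is a supernet ABA, j is a hypernet ABA and j's window is i's flip, dropping A's dead bound-method comparison.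
import Mathlib
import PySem

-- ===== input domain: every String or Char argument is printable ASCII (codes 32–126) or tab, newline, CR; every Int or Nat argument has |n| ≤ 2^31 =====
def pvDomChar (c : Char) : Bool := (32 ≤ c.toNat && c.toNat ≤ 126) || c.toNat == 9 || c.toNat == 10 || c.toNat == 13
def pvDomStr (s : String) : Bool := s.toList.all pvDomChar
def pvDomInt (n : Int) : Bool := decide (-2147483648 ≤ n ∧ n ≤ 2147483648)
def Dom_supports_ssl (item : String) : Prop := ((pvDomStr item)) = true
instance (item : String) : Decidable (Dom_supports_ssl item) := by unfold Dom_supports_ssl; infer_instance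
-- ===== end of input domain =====

-- B replaces A's collect-then-match state machine (aba/bab lists) by a precomputed
-- per-position label table and an exhaustive check over all pairs of window indices
-- (alternative algorithm, no collections; not claimed faster).

-- ===== PORT A =====
def is_aba (it : List Char) : Bool :=
  if it.length ≠ 3 then false
  else if PySem.List.pyGet? it 0 ≠ PySem.List.pyGet? it 2 then false
  else if PySem.List.pyGet? it 0 = PySem.List.pyGet? it 1 then false
  else true

-- indices 0 and 1 are in range at every call site (the caller checked is_aba, so length = 3)
def flip_aba (it : List Char) : List Char :=
  [(PySem.List.pyGet? it 1).getD ' ', (PySem.List.pyGet? it 0).getD ' ',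
   (PySem.List.pyGet? it 1).getD ' ']

-- loop body of A's for-loop (state: in_hypernet, aba, bab)
def aStep (cs : List Char) (s : Bool × List (List Char) × List (List Char)) (i : Int) :
    Bool × List (List Char) × List (List Char) :=
  let cand := PySem.List.slice cs (some i) (some (i + 3))
  if PySem.List.pyGet? cand 0 = some '[' then (true, s.2.1, s.2.2)
  else if PySem.List.pyGet? cand 0 = some ']' then (false, s.2.1, s.2.2)
  else if ['[', ']'].any (fun c => cand.contains c) then s
  else if ¬ is_aba cand then s
  else if s.1 then (s.1, s.2.1, s.2.2 ++ [cand])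
  else (s.1, s.2.1 ++ [cand], s.2.2)

def supports_ssl (item : String) : Bool :=
  let cs := item.toList
  let st := (PySem.List.pyRange 0 ((cs.length : Int) - 2)).foldl (aStep cs) (false, [], [])
  -- Python's `aba.count == 0 or bab.count == 0` compares bound methods with 0: always False, never returns here
  st.2.1.any (fun x => st.2.2.contains (flip_aba x))

-- ===== PORT B =====
-- `labels.append(h); if c == '[': h = True elif c == ']': h = False` loop body
def pvBUpd (b : Bool) (c : Char) : Bool := if c = '[' then true else if c = ']' then false else b

def bLabels (cs : List Char) : List Bool :=
  (cs.foldl (fun (st : List Bool × Bool) c => (st.1 ++ [st.2], pvBUpd st.2 c)) ([], false)).1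

-- Python's local `ok(i)`
def bOk (cs : List Char) (i : Int) : Bool :=
  let a := (PySem.List.pyGet? cs i).getD ' '
  let b := (PySem.List.pyGet? cs (i + 1)).getD ' '
  let c := (PySem.List.pyGet? cs (i + 2)).getD ' '
  !(a == '[') && !(a == ']') && !(b == '[') && !(b == ']') && !(c == '[') && !(c == ']') &&
    (a == c) && !(a == b)

def supports_ssl_alt (item : String) : Bool :=
  let cs := item.toList
  let n : Int := (cs.length : Int)
  let labels := bLabels cs
  (PySem.List.pyRange 0 (n - 2)).any (fun i =>
    (bOk cs i && !((PySem.List.pyGet? labels i).getD false)) &&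
    (PySem.List.pyRange 0 (n - 2)).any (fun j =>
      bOk cs j && ((PySem.List.pyGet? labels j).getD false) &&
      (PySem.List.pyGet? cs j == PySem.List.pyGet? cs (i + 1)) &&
      (PySem.List.pyGet? cs (j + 1) == PySem.List.pyGet? cs i)))

-- ===== PRECONDITION & SPEC =====
def Spec_supports_ssl (item : String) (out : Bool) : Prop := out = supports_ssl_alt item
instance (item : String) (out : Bool) : Decidable (Spec_supports_ssl item out) := by unfold Spec_supports_ssl; infer_instance

-- ===== CLAIM (what is proved, stated in full; the proofs are below) =====
def Claim_equal_supports_ssl : Prop := ∀ (item : String), Dom_supports_ssl item → Spec_supports_ssl item (supports_ssl item)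

-- ===== LEMMAS AND PROOFS =====

-- character k of cs (always used in range)
def pvCh (cs : List Char) (k : Nat) : Char := cs.getD k ' '

def pvBrk (c : Char) : Bool := c = '[' || c = ']'

-- hypernet label at position i: last bracket among the first i characters
def pvLab (cs : List Char) (i : Nat) : Bool := (cs.take i).foldl pvBUpd false

-- "there is a bracket-free ABA window at i with label h"
def pvQ (cs : List Char) (i : Nat) (h : Bool) : Prop :=
  i + 3 ≤ cs.length ∧ pvBrk (pvCh cs i) = false ∧ pvBrk (pvCh cs (i+1)) = false ∧
  pvBrk (pvCh cs (i+2)) = false ∧ pvCh cs i = pvCh cs (i+2) ∧ pvCh cs i ≠ pvCh cs (i+1) ∧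
  pvLab cs i = h

-- common characterisation of both programs
def pvP (cs : List Char) : Prop :=
  ∃ i j, pvQ cs i false ∧ pvQ cs j true ∧ pvCh cs j = pvCh cs (i+1) ∧ pvCh cs (j+1) = pvCh cs i

def pvWin (cs : List Char) (i : Nat) : List Char := [pvCh cs i, pvCh cs (i+1), pvCh cs (i+2)]

lemma pvRange_nil (b : Int) (h : b ≤ 0) : PySem.List.pyRange 0 b = [] := by
  unfold PySem.List.pyRange; split <;> simp_all

lemma pvLab_succ (cs : List Char) (i : Nat) (h : i < cs.length) :
    pvLab cs (i+1) =
      (if pvCh cs i = '[' then true else if pvCh cs i = ']' then false else pvLab cs i) := by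
  unfold pvLab pvCh
  rw [List.take_succ_eq_append_getElem h, List.foldl_append,
      List.getD_eq_getElem _ _ h]
  rfl

lemma pvLab_succ_nobrk (cs : List Char) (i : Nat) (h : i < cs.length)
    (hb : pvBrk (pvCh cs i) = false) : pvLab cs (i+1) = pvLab cs i := by
  rw [pvLab_succ cs i h]
  unfold pvBrk at hb
  simp only [Bool.or_eq_false_iff, decide_eq_false_iff_not] at hb
  rw [if_neg hb.1, if_neg hb.2]

lemma pvSlice3 (cs : List Char) (m : Nat) (h : m + 3 ≤ cs.length) :
    PySem.List.slice cs (some (m:Int)) (some ((m:Int)+3)) = pvWin cs m := by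
  have e : ((m:Int)+3) = ((m+3 : Nat) : Int) := by push_cast; ring
  have h3 : m + 3 - m = 3 := by omega
  unfold pvWin pvCh
  rw [e, PySem.List.slice_natCast, h3,
      List.drop_eq_getElem_cons (by omega),
      List.drop_eq_getElem_cons (l := cs) (i := m+1) (by omega),
      List.drop_eq_getElem_cons (l := cs) (i := m+2) (by omega),
      List.getD_eq_getElem _ _ (show m < cs.length by omega),
      List.getD_eq_getElem _ _ (show m+1 < cs.length by omega),
      List.getD_eq_getElem _ _ (show m+2 < cs.length by omega)]
  rfl

-- ---------- A side ----------

lemma pvWin_get0 (cs : List Char) (m : Nat) :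
    PySem.List.pyGet? (pvWin cs m) 0 = some (pvCh cs m) := by
  simp [pvWin, PySem.List.pyGet?, PySem.List.pyIdx?]

lemma pvIsAba_win (cs : List Char) (m : Nat) :
    is_aba (pvWin cs m) = true ↔
      (pvCh cs m = pvCh cs (m+2) ∧ pvCh cs m ≠ pvCh cs (m+1)) := by
  simp [is_aba, pvWin, PySem.List.pyGet?, PySem.List.pyIdx?]

lemma pvFlip_win (cs : List Char) (m : Nat) :
    flip_aba (pvWin cs m) = [pvCh cs (m+1), pvCh cs m, pvCh cs (m+1)] := by
  simp [flip_aba, pvWin, PySem.List.pyGet?, PySem.List.pyIdx?]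

lemma pvAnyBrk_true (cs : List Char) (m : Nat) :
    (['[', ']'].any fun c => (pvWin cs m).contains c) = true ↔
      (pvBrk (pvCh cs m) || pvBrk (pvCh cs (m+1)) || pvBrk (pvCh cs (m+2))) = true := by
  simp [pvWin, pvBrk]
  constructor
  · tauto
  · tauto

lemma pvSkip (cs : List Char) (m : Nat) (h : Bool) (hfail : ¬ pvQ cs m h) (x : List Char) :
    (∃ i, i < m+1 ∧ pvQ cs i h ∧ x = pvWin cs i) ↔
      ∃ i, i < m ∧ pvQ cs i h ∧ x = pvWin cs i := by
  constructor
  · rintro ⟨i, hi, hq, hx⟩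
    rcases Nat.lt_succ_iff_lt_or_eq.mp hi with hi' | hi'
    · exact ⟨i, hi', hq, hx⟩
    · subst hi'; exact absurd hq hfail
  · rintro ⟨i, hi, hq, hx⟩
    exact ⟨i, by omega, hq, hx⟩

lemma A_inv (cs : List Char) (m : Nat) (hm : m + 2 ≤ cs.length) :
    ((PySem.List.pyRange 0 (m:Int)).foldl (aStep cs) (false, [], [])).1 = pvLab cs m ∧
    (∀ x, x ∈ ((PySem.List.pyRange 0 (m:Int)).foldl (aStep cs) (false, [], [])).2.1 ↔
      ∃ i, i < m ∧ pvQ cs i false ∧ x = pvWin cs i) ∧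
    (∀ x, x ∈ ((PySem.List.pyRange 0 (m:Int)).foldl (aStep cs) (false, [], [])).2.2 ↔
      ∃ i, i < m ∧ pvQ cs i true ∧ x = pvWin cs i) := by
  induction m with
  | zero =>
    rw [show ((0:Nat):Int) = 0 from rfl, pvRange_nil 0 le_rfl]
    refine ⟨rfl, ?_, ?_⟩ <;> intro x <;> simp
  | succ m ih =>
    obtain ⟨ih1, ih2, ih3⟩ := ih (by omega)
    rw [show ((m+1:Nat):Int) = (m:Int) + 1 by push_cast; ring,
        PySem.List.pyRange_one_succ_right (by positivity), List.foldl_append,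
        List.foldl_cons, List.foldl_nil]
    set st := (PySem.List.pyRange 0 (m:Int)).foldl (aStep cs) (false, [], []) with hst
    unfold aStep
    rw [pvSlice3 cs m (by omega)]
    simp only [pvWin_get0 cs m, Option.some.injEq]
    by_cases h0 : pvCh cs m = '['
    · rw [if_pos h0]
      have hfail : ∀ h : Bool, ¬ pvQ cs m h := by
        intro h hq; have := hq.2.1; simp [pvBrk, h0] at this
      refine ⟨?_, ?_, ?_⟩
      · rw [pvLab_succ cs m (by omega), if_pos h0]
      · intro x; rw [pvSkip cs m false (hfail false) x]; exact ih2 x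
      · intro x; rw [pvSkip cs m true (hfail true) x]; exact ih3 x
    · rw [if_neg h0]
      by_cases h1 : pvCh cs m = ']'
      · rw [if_pos h1]
        have hfail : ∀ h : Bool, ¬ pvQ cs m h := by
          intro h hq; have := hq.2.1; simp [pvBrk, h1] at this
        refine ⟨?_, ?_, ?_⟩
        · rw [pvLab_succ cs m (by omega), if_neg h0, if_pos h1]
        · intro x; rw [pvSkip cs m false (hfail false) x]; exact ih2 x
        · intro x; rw [pvSkip cs m true (hfail true) x]; exact ih3 x
      · rw [if_neg h1]
        have hb0 : pvBrk (pvCh cs m) = false := by simp [pvBrk, h0, h1]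
        have hlab : pvLab cs (m+1) = pvLab cs m := pvLab_succ_nobrk cs m (by omega) hb0
        by_cases hbr : (['[', ']'].any fun c => (pvWin cs m).contains c) = true
        · rw [if_pos hbr]
          have hfail : ∀ h : Bool, ¬ pvQ cs m h := by
            intro h hq
            have q1 := hq.2.1; have q2 := hq.2.2.1; have q3 := hq.2.2.2.1
            rw [pvAnyBrk_true cs m] at hbr
            rw [q1, q2, q3] at hbr
            simp at hbr
          refine ⟨ih1.trans hlab.symm, ?_, ?_⟩
          · intro x; rw [pvSkip cs m false (hfail false) x]; exact ih2 x
          · intro x; rw [pvSkip cs m true (hfail true) x]; exact ih3 x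
        · rw [if_neg hbr]
          have hnb : pvBrk (pvCh cs (m+1)) = false ∧ pvBrk (pvCh cs (m+2)) = false := by
            have hbr' := (not_congr (pvAnyBrk_true cs m)).mp hbr
            simp only [Bool.or_eq_true, not_or, Bool.not_eq_true] at hbr'
            exact ⟨hbr'.1.2, hbr'.2⟩
          by_cases haba : is_aba (pvWin cs m) = true
          · rw [if_neg (by simp [haba])]
            have hc := (pvIsAba_win cs m).mp haba
            have hQm : pvQ cs m (pvLab cs m) :=
              ⟨by omega, hb0, hnb.1, hnb.2, hc.1, hc.2, rfl⟩
            by_cases hl : pvLab cs m = true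
            · rw [if_pos (show st.1 = true from ih1.trans hl)]
              rw [hl] at hQm
              refine ⟨ih1.trans hlab.symm, ?_, ?_⟩
              · intro x
                rw [pvSkip cs m false (by intro hq; rw [hq.2.2.2.2.2.2] at hl; simp at hl) x]
                exact ih2 x
              · intro x
                simp only [List.mem_append, List.mem_singleton]
                rw [ih3 x]
                constructor
                · rintro (⟨i, hi, hq, hx⟩ | hx)
                  · exact ⟨i, by omega, hq, hx⟩
                  · exact ⟨m, by omega, hQm, hx⟩
                · rintro ⟨i, hi, hq, hx⟩
                  rcases Nat.lt_succ_iff_lt_or_eq.mp hi with hi' | hi'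
                  · exact Or.inl ⟨i, hi', hq, hx⟩
                  · subst hi'; exact Or.inr hx
            · have hl' : pvLab cs m = false := by simpa using hl
              rw [if_neg (show ¬ st.1 = true by rw [ih1, hl']; simp)]
              rw [hl'] at hQm
              refine ⟨ih1.trans hlab.symm, ?_, ?_⟩
              · intro x
                simp only [List.mem_append, List.mem_singleton]
                rw [ih2 x]
                constructor
                · rintro (⟨i, hi, hq, hx⟩ | hx)
                  · exact ⟨i, by omega, hq, hx⟩
                  · exact ⟨m, by omega, hQm, hx⟩
                · rintro ⟨i, hi, hq, hx⟩
                  rcases Nat.lt_succ_iff_lt_or_eq.mp hi with hi' | hi'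
                  · exact Or.inl ⟨i, hi', hq, hx⟩
                  · subst hi'; exact Or.inr hx
              · intro x
                rw [pvSkip cs m true (by intro hq; rw [hq.2.2.2.2.2.2] at hl'; simp at hl') x]
                exact ih3 x
          · rw [if_pos (by simp [haba])]
            have hfail : ∀ h : Bool, ¬ pvQ cs m h := by
              intro h hq
              exact haba ((pvIsAba_win cs m).mpr ⟨hq.2.2.2.2.1, hq.2.2.2.2.2.1⟩)
            refine ⟨ih1.trans hlab.symm, ?_, ?_⟩
            · intro x; rw [pvSkip cs m false (hfail false) x]; exact ih2 x
            · intro x; rw [pvSkip cs m true (hfail true) x]; exact ih3 x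

lemma A_char (item : String) : supports_ssl item = true ↔ pvP item.toList := by
  have e : supports_ssl item =
      ((PySem.List.pyRange 0 ((item.toList.length : Int) - 2)).foldl (aStep item.toList)
        (false, [], [])).2.1.any (fun x =>
        ((PySem.List.pyRange 0 ((item.toList.length : Int) - 2)).foldl (aStep item.toList)
          (false, [], [])).2.2.contains (flip_aba x)) := rfl
  rw [e]
  rcases Nat.lt_or_ge item.toList.length 2 with h | h
  · rw [pvRange_nil _ (by omega)]
    simp only [List.foldl_nil, List.any_nil]
    constructor
    · intro hf; simp at hf
    · rintro ⟨i, j, hqi, _⟩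
      have := hqi.1; omega
  · rw [show ((item.toList.length : Int) - 2) = ((item.toList.length - 2 : Nat) : Int) by omega]
    obtain ⟨-, h2, h3⟩ := A_inv item.toList (item.toList.length - 2) (by omega)
    rw [List.any_eq_true]
    constructor
    · rintro ⟨x, hx, hcont⟩
      obtain ⟨i, hi, hqi, rfl⟩ := (h2 x).mp hx
      rw [pvFlip_win] at hcont
      simp only [List.contains_eq_mem, decide_eq_true_eq] at hcont
      obtain ⟨j, hj, hqj, hwin⟩ := (h3 _).mp hcont
      simp only [pvWin, List.cons.injEq, and_true] at hwin
      exact ⟨i, j, hqi, hqj, hwin.1.symm, hwin.2.1.symm⟩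
    · rintro ⟨i, j, hqi, hqj, e1, e2⟩
      refine ⟨pvWin item.toList i, (h2 _).mpr ⟨i, by have := hqi.1; omega, hqi, rfl⟩, ?_⟩
      rw [pvFlip_win]
      have e3 : [pvCh item.toList (i+1), pvCh item.toList i, pvCh item.toList (i+1)] =
          pvWin item.toList j := by
        simp only [pvWin, List.cons.injEq, and_true]
        refine ⟨e1.symm, e2.symm, ?_⟩
        rw [← hqj.2.2.2.2.1, e1]
      rw [e3]
      simp only [List.contains_eq_mem, decide_eq_true_eq]
      exact (h3 _).mpr ⟨j, by have := hqj.1; omega, hqj, rfl⟩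

-- ---------- B side ----------

lemma pvFold_lab (cs : List Char) (acc : List Bool) (b : Bool) :
    cs.foldl (fun (st : List Bool × Bool) c => (st.1 ++ [st.2], pvBUpd st.2 c)) (acc, b)
      = (acc ++ (List.range cs.length).map (fun i => (cs.take i).foldl pvBUpd b),
         cs.foldl pvBUpd b) := by
  induction cs generalizing acc b with
  | nil => simp
  | cons c cs ih =>
    simp only [List.foldl_cons]
    rw [ih (acc ++ [b]) (pvBUpd b c)]
    refine Prod.ext ?_ rfl
    show acc ++ [b] ++ _ = acc ++ _
    rw [List.length_cons, List.range_succ_eq_map, List.map_cons, List.map_map,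
        List.append_assoc, List.singleton_append]
    congr 2

lemma pvGet_ch (cs : List Char) (k : Nat) (hk : k < cs.length) :
    PySem.List.pyGet? cs ((k : Nat) : Int) = some (pvCh cs k) := by
  rw [PySem.List.pyGet?_natCast, List.getElem?_eq_getElem hk]
  unfold pvCh
  rw [List.getD_eq_getElem _ _ hk]

lemma pvLabels_get (cs : List Char) (k : Nat) (hk : k < cs.length) :
    (PySem.List.pyGet? (bLabels cs) ((k : Nat) : Int)).getD false = pvLab cs k := by
  unfold bLabels
  rw [pvFold_lab cs [] false]
  simp only [List.nil_append]
  rw [PySem.List.pyGet?_natCast,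
      List.getElem?_eq_getElem (by simpa using hk)]
  simp only [List.getElem_map, List.getElem_range, Option.getD_some]
  rfl

lemma pvBOk (cs : List Char) (k : Nat) (hk : k + 3 ≤ cs.length) :
    bOk cs ((k : Nat) : Int) = true ↔
      (pvBrk (pvCh cs k) = false ∧ pvBrk (pvCh cs (k+1)) = false ∧
       pvBrk (pvCh cs (k+2)) = false ∧ pvCh cs k = pvCh cs (k+2) ∧
       pvCh cs k ≠ pvCh cs (k+1)) := by
  unfold bOk
  rw [show (((k:Nat):Int) + 1) = (((k+1:Nat):Nat) : Int) by push_cast; ring,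
      show (((k:Nat):Int) + 2) = (((k+2:Nat):Nat) : Int) by push_cast; ring,
      pvGet_ch cs k (by omega), pvGet_ch cs (k+1) (by omega), pvGet_ch cs (k+2) (by omega)]
  simp only [Option.getD_some, Bool.and_eq_true, Bool.not_eq_true', beq_eq_false_iff_ne,
    ne_eq, beq_iff_eq, pvBrk, Bool.or_eq_false_iff, decide_eq_false_iff_not]
  tauto

lemma B_char (item : String) : supports_ssl_alt item = true ↔ pvP item.toList := by
  have e : supports_ssl_alt item =
      (PySem.List.pyRange 0 ((item.toList.length : Int) - 2)).any (fun i =>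
        (bOk item.toList i && !((PySem.List.pyGet? (bLabels item.toList) i).getD false)) &&
        (PySem.List.pyRange 0 ((item.toList.length : Int) - 2)).any (fun j =>
          bOk item.toList j && ((PySem.List.pyGet? (bLabels item.toList) j).getD false) &&
          (PySem.List.pyGet? item.toList j == PySem.List.pyGet? item.toList (i + 1)) &&
          (PySem.List.pyGet? item.toList (j + 1) == PySem.List.pyGet? item.toList i))) := rfl
  rw [e]
  set cs := item.toList with hcs
  simp only [List.any_eq_true, Bool.and_eq_true]
  constructor
  · rintro ⟨i, hi, ⟨hok1, hlab1⟩, j, hj, hcond⟩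
    rw [PySem.List.mem_pyRange_one] at hi hj
    obtain ⟨hi0, hi2⟩ := hi
    obtain ⟨hj0, hj2⟩ := hj
    obtain ⟨k, rfl⟩ : ∃ k : Nat, i = (k : Int) := ⟨i.toNat, (Int.toNat_of_nonneg hi0).symm⟩
    obtain ⟨m, rfl⟩ : ∃ m : Nat, j = (m : Int) := ⟨j.toNat, (Int.toNat_of_nonneg hj0).symm⟩
    have hk3 : k + 3 ≤ cs.length := by omega
    have hm3 : m + 3 ≤ cs.length := by omega
    rw [pvLabels_get cs k (by omega)] at hlab1
    rw [show ((k:Int) + 1) = (((k+1:Nat):Nat):Int) by push_cast; ring,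
        show ((m:Int) + 1) = (((m+1:Nat):Nat):Int) by push_cast; ring,
        pvLabels_get cs m (by omega),
        pvGet_ch cs m (by omega), pvGet_ch cs (k+1) (by omega),
        pvGet_ch cs (m+1) (by omega), pvGet_ch cs k (by omega)] at hcond
    simp only [Bool.not_eq_true'] at hlab1
    simp only [beq_iff_eq, Option.some.injEq] at hcond
    obtain ⟨⟨⟨hok2, hlab2⟩, heq1⟩, heq2⟩ := hcond
    obtain ⟨b1, b2, b3, c1, c2⟩ := (pvBOk cs k hk3).mp hok1
    obtain ⟨d1, d2, d3, e1', e2'⟩ := (pvBOk cs m hm3).mp hok2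
    exact ⟨k, m, ⟨hk3, b1, b2, b3, c1, c2, hlab1⟩, ⟨hm3, d1, d2, d3, e1', e2', hlab2⟩,
      heq1, heq2⟩
  · rintro ⟨k, m, hqk, hqm, e1', e2'⟩
    have hk3 := hqk.1
    have hm3 := hqm.1
    refine ⟨(k : Int), ?_, ⟨?_, ?_⟩, (m : Int), ?_, ?_⟩
    · rw [PySem.List.mem_pyRange_one]
      exact ⟨by positivity, by omega⟩
    · exact (pvBOk cs k hk3).mpr ⟨hqk.2.1, hqk.2.2.1, hqk.2.2.2.1, hqk.2.2.2.2.1,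
        hqk.2.2.2.2.2.1⟩
    · rw [pvLabels_get cs k (by omega)]
      simp only [Bool.not_eq_true']
      exact hqk.2.2.2.2.2.2
    · rw [PySem.List.mem_pyRange_one]
      exact ⟨by positivity, by omega⟩
    · rw [show ((k:Int) + 1) = (((k+1:Nat):Nat):Int) by push_cast; ring,
          show ((m:Int) + 1) = (((m+1:Nat):Nat):Int) by push_cast; ring,
          pvLabels_get cs m (by omega),
          pvGet_ch cs m (by omega), pvGet_ch cs (k+1) (by omega),
          pvGet_ch cs (m+1) (by omega), pvGet_ch cs k (by omega)]
      simp only [beq_iff_eq, Option.some.injEq]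
      exact ⟨⟨⟨(pvBOk cs m hm3).mpr ⟨hqm.2.1, hqm.2.2.1, hqm.2.2.2.1, hqm.2.2.2.2.1,
          hqm.2.2.2.2.2.1⟩, hqm.2.2.2.2.2.2⟩, e1'⟩, e2'⟩

-- ===== VERDICT (by name: the statement is the Claim_ definition above) =====
theorem supports_ssl_spec : Claim_equal_supports_ssl := by
  intro item _
  unfold Spec_supports_ssl
  have ha := A_char item
  have hb := B_char item
  cases h : supports_ssl_alt item
  · cases h2 : supports_ssl item
    · rfl
    · exact absurd (hb.mpr (ha.mp h2)) (by simp [h])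
  · exact ha.mpr (hb.mp h)
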